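-- pv_equiv track=rewrite | github.com/AnonChaisrithong/AnonChaisrithong | project/09 34 เติมเลข.py | pattern5
-- ===== SOURCE A (Python) =====
-- def pattern5(N):
--     l1 = []
--     for i in range(N):
--         c = i + 1
--         l2 = []
--         for k in range(i):
--             l2.append(0)
--         for k in range(N - i):
--             l2.append(c)
--             c += N - k
--         l1.append(l2)
--     return l1
-- ===== SOURCE B (Python) =====
-- def pattern5(N):
--     return [[0] * i + [i + 1 + j * N - j * (j - 1) // 2 for j in range(N - i)]
--             for i in range(N)]
-- ===== Notes on version B (the rewrite author's own statement) =====
-- stated objective: simpler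
-- what changed: Replaces the running-sum accumulator loop with a direct closed-form expression i+1 + j*N - j*(j-1)//2 for each element, built by comprehension.
import Mathlib
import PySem

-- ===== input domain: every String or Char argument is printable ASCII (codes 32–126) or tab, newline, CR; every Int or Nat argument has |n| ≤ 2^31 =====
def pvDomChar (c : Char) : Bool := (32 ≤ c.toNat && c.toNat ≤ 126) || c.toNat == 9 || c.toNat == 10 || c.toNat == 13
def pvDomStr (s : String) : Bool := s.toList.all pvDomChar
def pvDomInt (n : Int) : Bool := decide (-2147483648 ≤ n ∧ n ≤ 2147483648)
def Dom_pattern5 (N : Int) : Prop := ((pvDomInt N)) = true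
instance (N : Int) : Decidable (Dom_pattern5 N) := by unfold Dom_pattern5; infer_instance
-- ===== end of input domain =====

-- B replaces A's running-sum accumulator with a closed-form expression per element (objective: simpler).

-- ===== PORT A =====
def pattern5 (N : Int) : List (List Int) :=
  (PySem.List.pyRange 0 N 1).foldl (fun l1 i =>
    let c := i + 1
    let l2 : List Int := []
    let l2 := (PySem.List.pyRange 0 i 1).foldl (fun acc _ => acc ++ [(0:Int)]) l2
    let p := (PySem.List.pyRange 0 (N - i) 1).foldl
      (fun (p : List Int × Int) k => (p.1 ++ [p.2], p.2 + (N - k))) (l2, c)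
    l1 ++ [p.1]) []

-- ===== PORT B =====
def pattern5_alt (N : Int) : List (List Int) :=
  (PySem.List.pyRange 0 N 1).map (fun i =>
    List.replicate i.toNat (0:Int) ++
      (PySem.List.pyRange 0 (N - i) 1).map
        (fun j => i + 1 + j * N - PySem.Int.floordiv (j * (j - 1)) 2))

-- ===== PRECONDITION & SPEC =====
def Spec_pattern5 (N : Int) (out : List (List Int)) : Prop := out = pattern5_alt N
instance (N : Int) (out : List (List Int)) : Decidable (Spec_pattern5 N out) := by unfold Spec_pattern5; infer_instance

-- ===== CLAIM (what is proved, stated in full; the proofs are below) =====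
def Claim_equal_pattern5 : Prop := ∀ (N : Int), Dom_pattern5 N → Spec_pattern5 N (pattern5 N)

-- ===== LEMMAS AND PROOFS =====

-- appending a constant per element is `replicate`
lemma foldl_append_zero (l : List Int) (init : List Int) :
    l.foldl (fun acc _ => acc ++ [(0:Int)]) init = init ++ List.replicate l.length 0 := by
  induction l generalizing init with
  | nil => simp
  | cons x xs ih => simp [List.foldl_cons, ih, List.replicate_succ]

-- triangular-number step: T(n+1) = T(n) + n where T j = (j*(j-1)) // 2
lemma tri_step (n : Int) :
    PySem.Int.floordiv ((n + 1) * n) 2 = PySem.Int.floordiv (n * (n - 1)) 2 + n := by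
  rw [PySem.Int.floordiv_eq_ediv_of_pos (by norm_num : (0:Int) < 2),
      PySem.Int.floordiv_eq_ediv_of_pos (by norm_num : (0:Int) < 2)]
  have h1 : (2:Int) ∣ (n + 1) * n := by
    have := Int.even_mul_succ_self n
    exact (by rwa [mul_comm] at this : Even ((n+1) * n)).two_dvd
  have h2 : (2:Int) ∣ n * (n - 1) := by
    have := Int.even_mul_succ_self (n - 1)
    simpa [mul_comm] using this.two_dvd
  have e1 := Int.mul_ediv_cancel' h1
  have e2 := Int.mul_ediv_cancel' h2
  linarith

-- A's inner running-sum loop computes B's closed form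
lemma loopA (N c0 : Int) (init : List Int) (n : Nat) :
    (PySem.List.pyRange 0 (n : Int) 1).foldl
      (fun (p : List Int × Int) k => (p.1 ++ [p.2], p.2 + (N - k))) (init, c0)
    = (init ++ (PySem.List.pyRange 0 (n : Int) 1).map
         (fun j => c0 + j * N - PySem.Int.floordiv (j * (j - 1)) 2),
       c0 + (n : Int) * N - PySem.Int.floordiv ((n : Int) * ((n : Int) - 1)) 2) := by
  induction n with
  | zero =>
      simp [PySem.List.pyRange_one_eq_nil, PySem.Int.floordiv]
  | succ m ih =>
      have hcast : ((m + 1 : Nat) : Int) = (m : Int) + 1 := by push_cast; ring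
      rw [hcast, PySem.List.pyRange_one_succ_right (Int.natCast_nonneg m),
          List.foldl_append, ih, List.map_append]
      simp only [List.foldl_cons, List.foldl_nil, List.map_cons, List.map_nil,
        List.append_assoc, Prod.mk.injEq]
      constructor
      · trivial
      · have := tri_step (m : Int)
        simp only [add_sub_cancel_right]
        linarith

-- ===== VERDICT (by name: the statement is the Claim_ definition above) =====
theorem pattern5_spec : Claim_equal_pattern5 := by
  intro N _
  show pattern5 N = pattern5_alt N
  unfold pattern5 pattern5_alt
  rw [PySem.List.foldl_append_singleton_eq_map]
  apply List.map_congr_left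
  intro i hi
  obtain ⟨h0, hN⟩ := (PySem.List.mem_pyRange_one).1 hi
  have hzeros : (PySem.List.pyRange 0 i 1).foldl (fun acc _ => acc ++ [(0:Int)]) ([]:List Int)
      = List.replicate i.toNat 0 := by
    rw [foldl_append_zero]
    simp [PySem.List.length_pyRange_one]
  have hn : ((N - i).toNat : Int) = N - i := Int.toNat_of_nonneg (by omega)
  simp only [hzeros]
  have := loopA N (i + 1) (List.replicate i.toNat 0) (N - i).toNat
  rw [hn] at this
  rw [this]
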